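-- pv_equiv track=rewrite | github.com/mikolajpluta/portfolio | school_projects/alrithms_adn_data_structures/graphs/graphs.py | first_node
-- ===== SOURCE A (Python) =====
-- def first_node(next_list, data_list):
--     for i in range(1,len(next_list)+1):
--         tmp = 1
--         if i in data_list:
--             continue
--         for j in range(1,len(next_list)):
--             if i in next_list[j][1:]:
--                 tmp = 0
--                 break
--         if tmp == 1:
--             return i
--     return 0
-- ===== SOURCE B (Python) =====
-- def first_node(next_list, data_list):
--     used = []
--     for j in range(1, len(next_list)):
--         used.extend(next_list[j][1:])
--     used.extend(data_list)
--     used.sort()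
--     expected = 1
--     for v in used:
--         if v == expected:
--             expected += 1
--         elif v > expected:
--             break
--     return expected if expected <= len(next_list) else 0
-- ===== Notes on version B (the rewrite author's own statement) =====
-- stated objective: faster
-- what changed: Replaces A's per-candidate rescans of all rows (and data_list) by collecting every referenced value once, sorting, and one gap-finding walk with an expected counter, capped at len(next_list).
import Mathlib
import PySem

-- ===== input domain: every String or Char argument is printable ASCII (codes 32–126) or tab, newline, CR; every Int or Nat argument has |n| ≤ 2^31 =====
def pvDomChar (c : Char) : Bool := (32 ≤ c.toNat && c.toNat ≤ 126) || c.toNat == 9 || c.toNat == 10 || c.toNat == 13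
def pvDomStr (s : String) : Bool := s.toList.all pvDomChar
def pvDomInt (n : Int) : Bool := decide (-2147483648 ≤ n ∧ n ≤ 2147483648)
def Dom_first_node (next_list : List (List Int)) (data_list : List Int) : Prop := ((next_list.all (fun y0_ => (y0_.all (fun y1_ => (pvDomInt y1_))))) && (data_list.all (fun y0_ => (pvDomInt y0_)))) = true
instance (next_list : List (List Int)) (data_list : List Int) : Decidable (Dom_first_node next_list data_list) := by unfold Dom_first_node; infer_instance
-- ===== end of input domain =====

-- B replaces A's nested per-candidate rescans by one sort of all referenced values plus a single
-- gap-finding walk (objective: faster).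

-- ===== PORT A =====
-- next_list[j][1:] : j drawn from range(1, len(next_list)) is always in range, so pyGetD with
-- default [] is exact here.
def pvA_row (next_list : List (List Int)) (j : Int) : List Int :=
  PySem.List.slice (PySem.List.pyGetD next_list j []) (some 1) none

-- inner 'for j in range(1, len(next_list))' loop with break; returns the final tmp
def pvA_inner (next_list : List (List Int)) (i : Int) : List Int → Int
  | [] => 1
  | j :: js => if i ∈ pvA_row next_list j then 0 else pvA_inner next_list i js

-- outer 'for i in range(1, len(next_list)+1)' loop with early return
def pvA_outer (next_list : List (List Int)) (data_list : List Int) : List Int → Int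
  | [] => 0
  | i :: is =>
    if i ∈ data_list then pvA_outer next_list data_list is
    else if pvA_inner next_list i (PySem.List.pyRange 1 (next_list.length : Int) 1) = 1 then i
    else pvA_outer next_list data_list is

def first_node (next_list : List (List Int)) (data_list : List Int) : Int :=
  pvA_outer next_list data_list (PySem.List.pyRange 1 ((next_list.length : Int) + 1) 1)

-- ===== PORT B =====
def pvB_used (next_list : List (List Int)) (data_list : List Int) : List Int :=
  ((PySem.List.pyRange 1 (next_list.length : Int) 1).foldl
    (fun acc j => acc ++ pvA_row next_list j) []) ++ data_list

-- the gap-finding walk over the sorted used values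
def pvB_walk : List Int → Int → Int
  | [], e => e
  | v :: vs, e => if v = e then pvB_walk vs (e + 1) else if v > e then e else pvB_walk vs e

def first_node_alt (next_list : List (List Int)) (data_list : List Int) : Int :=
  let s := PySem.List.sorted (pvB_used next_list data_list) (fun x => x) false
  let e := pvB_walk s 1
  if e ≤ (next_list.length : Int) then e else 0

-- ===== PRECONDITION & SPEC =====
def Spec_first_node (next_list : List (List Int)) (data_list : List Int) (out : Int) : Prop := out = first_node_alt next_list data_list
instance (next_list : List (List Int)) (data_list : List Int) (out : Int) : Decidable (Spec_first_node next_list data_list out) := by unfold Spec_first_node; infer_instance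

-- ===== CLAIM (what is proved, stated in full; the proofs are below) =====
def Claim_equal_first_node : Prop := ∀ (next_list : List (List Int)) (data_list : List Int), Dom_first_node next_list data_list → Spec_first_node next_list data_list (first_node next_list data_list)

-- ===== LEMMAS AND PROOFS =====

-- the walk returns the least value ≥ e missing from a ≤-sorted list
theorem pvB_walk_spec (l : List Int) (e : Int) (h : l.Pairwise (· ≤ ·)) :
    e ≤ pvB_walk l e ∧ pvB_walk l e ∉ l ∧ ∀ k, e ≤ k → k < pvB_walk l e → k ∈ l := by
  induction l generalizing e with
  | nil => exact ⟨le_rfl, by simp [pvB_walk], fun k h1 h2 => absurd (show k < e from h2) (by omega)⟩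
  | cons v vs ih =>
    rcases List.pairwise_cons.mp h with ⟨hv, hvs⟩
    by_cases hve : v = e
    · have hw : pvB_walk (v :: vs) e = pvB_walk vs (e + 1) := by simp [pvB_walk, hve]
      obtain ⟨h1, h2, h3⟩ := ih (e + 1) hvs
      rw [hw]
      refine ⟨by omega, ?_, ?_⟩
      · simp only [List.mem_cons, not_or]
        exact ⟨by omega, h2⟩
      · intro k hk1 hk2
        by_cases hkv : k = v
        · simp [hkv]
        · exact List.mem_cons_of_mem _ (h3 k (by omega) hk2)
    · by_cases hgt : v > e
      · simp only [pvB_walk, if_neg hve, if_pos hgt]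
        refine ⟨le_refl e, ?_, by omega⟩
        simp only [List.mem_cons, not_or]
        exact ⟨by omega, fun hmem => by have := hv _ hmem; omega⟩
      · simp only [pvB_walk, if_neg hve, if_neg hgt]
        obtain ⟨h1, h2, h3⟩ := ih e hvs
        refine ⟨h1, ?_, ?_⟩
        · simp only [List.mem_cons, not_or]
          exact ⟨by omega, h2⟩
        · intro k hk1 hk2
          exact List.mem_cons_of_mem _ (h3 k hk1 hk2)

-- membership in the collected 'used' list
theorem mem_pvB_used (next_list : List (List Int)) (data_list : List Int) (i : Int) :
    i ∈ pvB_used next_list data_list ↔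
      (∃ j ∈ PySem.List.pyRange 1 (next_list.length : Int) 1, i ∈ pvA_row next_list j) ∨
        i ∈ data_list := by
  unfold pvB_used
  rw [PySem.List.foldl_append_eq_flatMap]
  simp [List.mem_flatMap]

-- A's inner loop returns 1 iff i is referenced by no remaining row
theorem pvA_inner_eq_one_iff (next_list : List (List Int)) (i : Int) (js : List Int) :
    pvA_inner next_list i js = 1 ↔ ∀ j ∈ js, i ∉ pvA_row next_list j := by
  induction js with
  | nil => simp [pvA_inner]
  | cons j js ih =>
    simp only [pvA_inner]
    split_ifs with hm
    · constructor
      · intro h; omega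
      · intro h; exact absurd hm (h j (by simp))
    · simp only [List.mem_cons, ih]
      constructor
      · rintro h k (rfl | hk); exact hm; exact h k hk
      · intro h k hk; exact h k (Or.inr hk)

-- A's outer step, phrased through membership in B's used list
theorem pvA_outer_cons (next_list : List (List Int)) (data_list : List Int) (i : Int)
    (is : List Int) :
    pvA_outer next_list data_list (i :: is) =
      if i ∈ pvB_used next_list data_list then pvA_outer next_list data_list is else i := by
  simp only [pvA_outer]
  by_cases hd : i ∈ data_list
  · rw [if_pos hd, if_pos ((mem_pvB_used _ _ _).mpr (Or.inr hd))]
  · rw [if_neg hd]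
    by_cases hin : pvA_inner next_list i (PySem.List.pyRange 1 (next_list.length : Int) 1) = 1
    · rw [if_pos hin]
      have hnot : i ∉ pvB_used next_list data_list := by
        rw [mem_pvB_used]
        rintro (⟨j, hj, hmem⟩ | hd')
        · exact ((pvA_inner_eq_one_iff _ _ _).mp hin j hj) hmem
        · exact hd hd'
      rw [if_neg hnot]
    · rw [if_neg hin]
      have hin' : ∃ j ∈ PySem.List.pyRange 1 (next_list.length : Int) 1, i ∈ pvA_row next_list j := by
        by_contra hc
        push Not at hc
        exact hin ((pvA_inner_eq_one_iff _ _ _).mpr fun j hj => hc j hj)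
      rw [if_pos ((mem_pvB_used _ _ _).mpr (Or.inl hin'))]

-- A's remaining scan from candidate a, given the least missing value m of 'used'
theorem pvA_outer_range (next_list : List (List Int)) (data_list : List Int) (m : Int)
    (hm1 : m ∉ pvB_used next_list data_list)
    (hm2 : ∀ k, 1 ≤ k → k < m → k ∈ pvB_used next_list data_list) :
    ∀ (a : Int), 1 ≤ a → a ≤ m →
      pvA_outer next_list data_list (PySem.List.pyRange a ((next_list.length : Int) + 1) 1) =
        if m ≤ (next_list.length : Int) then m else 0 := by
  intro a ha ham
  by_cases hab : a < (next_list.length : Int) + 1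
  · rw [PySem.List.pyRange_one_cons hab]
    rw [pvA_outer_cons]
    by_cases hmem : a ∈ pvB_used next_list data_list
    · rw [if_pos hmem]
      have hne : a ≠ m := fun h => hm1 (h ▸ hmem)
      exact pvA_outer_range next_list data_list m hm1 hm2 (a + 1) (by omega) (by omega)
    · rw [if_neg hmem]
      have ham' : a = m := by
        by_contra hne
        exact hmem (hm2 a ha (by omega))
      rw [ham', if_pos (by omega)]
  · rw [PySem.List.pyRange_one_eq_nil (by omega)]
    have : ¬ m ≤ (next_list.length : Int) := by omega
    simp [pvA_outer, this]
termination_by a => ((next_list.length : Int) + 1 - a).toNat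
decreasing_by omega

-- ===== VERDICT (by name: the statement is the Claim_ definition above) =====
theorem first_node_spec : Claim_equal_first_node := by
  intro next_list data_list _
  unfold Spec_first_node first_node first_node_alt
  set s := PySem.List.sorted (pvB_used next_list data_list) (fun x => x) false with hs
  have hpw : s.Pairwise (· ≤ ·) := PySem.List.sorted_pairwise _ _
  obtain ⟨h1, h2, h3⟩ := pvB_walk_spec s 1 hpw
  have hmem : ∀ x, x ∈ s ↔ x ∈ pvB_used next_list data_list := by
    intro x; rw [hs, PySem.List.mem_sorted]
  exact pvA_outer_range next_list data_list (pvB_walk s 1)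
    (fun h => h2 ((hmem _).mpr h)) (fun k hk1 hk2 => (hmem _).mp (h3 k hk1 hk2)) 1 le_rfl h1
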